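-- pv_equiv track=rewrite | github.com/GautamaShastry/resume_screener | ai/agents/resume_coach.py | _parse_suggestions
-- ===== SOURCE A (Python) =====
-- def _parse_suggestions(content: str) -> list:
--     """Parse resume suggestions from LLM response."""
--     suggestions = []
--     current = {}
--
--     for line in content.split('\n'):
--         line = line.strip()
--         if not line:
--             continue
--
--         if 'SUGGESTION' in line.upper() and ':' not in line[11:]:
--             if current.get('section'):
--                 suggestions.append(current)
--             current = {}
--         elif line.upper().startswith('SECTION:'):
--             current['section'] = line.split(':', 1)[1].strip()
--         elif line.upper().startswith('CHANGE:'):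
--             current['change'] = line.split(':', 1)[1].strip()
--         elif line.upper().startswith('REASON:'):
--             current['reason'] = line.split(':', 1)[1].strip()
--
--     if current.get('section'):
--         suggestions.append(current)
--
--     return suggestions[:5]
-- ===== SOURCE B (Python) =====
-- def _parse_suggestions(content: str) -> list:
--     """Parse resume suggestions from LLM response (group-then-parse two-phase shape)."""
--     lines = [s for s in (raw.strip() for raw in content.split('\n')) if s]
--     segments = []
--     seg = []
--     for line in lines:
--         if 'SUGGESTION' in line.upper() and ':' not in line[11:]:
--             segments.append(seg)
--             seg = []
--         else:
--             seg.append(line)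
--     segments.append(seg)
--     parsed = [_fields(s) for s in segments]
--     return [d for d in parsed if d.get('section')][:5]
--
--
-- def _fields(seg: list) -> dict:
--     d = {}
--     for line in seg:
--         u = line.upper()
--         if u.startswith('SECTION:'):
--             d['section'] = line.split(':', 1)[1].strip()
--         elif u.startswith('CHANGE:'):
--             d['change'] = line.split(':', 1)[1].strip()
--         elif u.startswith('REASON:'):
--             d['reason'] = line.split(':', 1)[1].strip()
--     return d
-- ===== Notes on version B (the rewrite author's own statement) =====
-- stated objective: alternative
-- what changed: Replaces A's single interleaved loop (accumulator dict flushed at each header) by a two-phase group-then-parse shape: first split the stripped non-empty lines into segments at header lines, then parse each segment into a dict, filter the ones with a truthy section, and take the first 5.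
import Mathlib
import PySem

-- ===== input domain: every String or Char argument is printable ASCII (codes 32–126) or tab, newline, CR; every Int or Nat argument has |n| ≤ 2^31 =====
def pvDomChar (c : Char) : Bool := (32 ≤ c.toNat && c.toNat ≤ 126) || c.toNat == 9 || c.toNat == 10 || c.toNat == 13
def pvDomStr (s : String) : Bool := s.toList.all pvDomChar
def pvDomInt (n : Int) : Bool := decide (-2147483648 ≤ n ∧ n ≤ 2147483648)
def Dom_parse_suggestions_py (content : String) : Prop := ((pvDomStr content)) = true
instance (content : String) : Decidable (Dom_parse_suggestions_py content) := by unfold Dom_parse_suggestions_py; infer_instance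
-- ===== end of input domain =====

-- B replaces A's single interleaved loop (dict accumulator flushed at headers) by a two-phase
-- group-then-parse decomposition (split lines into segments at headers, then parse/filter/take 5);
-- same cost, alternative structure.


-- ===== PORT A =====
-- shared helpers (they transliterate text both Python sources contain verbatim):
-- header test: 'SUGGESTION' in line.upper() and ':' not in line[11:]
def pvHeader (line : String) : Bool :=
  PySem.Str.isIn "SUGGESTION" (PySem.Str.upper line) && !(PySem.Str.isIn ":" (PySem.Str.slice line (some 11) none))
-- line.split(':', 1)[1].strip()   (only evaluated under a startswith '…:' guard, where index 1 is in range, so the default is never used)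
def pvVal (line : String) : String :=
  PySem.Str.strip (PySem.List.pyGetD ((PySem.Str.splitMax? line ":" 1).getD []) 1 "")
-- the SECTION:/CHANGE:/REASON: elif chain acting on the current dict (A's inline chain = B's _fields body)
def pvStep (d : PySem.Dict String String) (line : String) : PySem.Dict String String :=
  if PySem.Str.startswith (PySem.Str.upper line) "SECTION:" then d.insert "section" (pvVal line)
  else if PySem.Str.startswith (PySem.Str.upper line) "CHANGE:" then d.insert "change" (pvVal line)
  else if PySem.Str.startswith (PySem.Str.upper line) "REASON:" then d.insert "reason" (pvVal line)
  else d
-- truthiness of current.get('section'): absent key and '' are both falsy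
def pvTruthy (d : PySem.Dict String String) : Bool := (d.getD "section" "") != ""

-- A's loop body: strip, skip empty, header flush, else the elif chain
def pvLoopA (acc : List (List (String × String)) × PySem.Dict String String) (rawline : String) :
    List (List (String × String)) × PySem.Dict String String :=
  let line := PySem.Str.strip rawline
  if line = "" then acc
  else if pvHeader line then
    ((if pvTruthy acc.2 then acc.1 ++ [acc.2.items] else acc.1), PySem.Dict.empty)
  else (acc.1, pvStep acc.2 line)

-- the trailing 'if current.get("section"): suggestions.append(current)'
def pvFinishA (r : List (List (String × String)) × PySem.Dict String String) :
    List (List (String × String)) :=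
  if pvTruthy r.2 then r.1 ++ [r.2.items] else r.1

def parse_suggestions_py (content : String) : List (List (String × String)) :=
  PySem.List.slice
    (pvFinishA (((PySem.Str.split? content "\n").getD []).foldl pvLoopA ([], PySem.Dict.empty)))
    none (some 5)

-- ===== PORT B =====
def pvCleanL (raws : List String) : List String :=
  (raws.map PySem.Str.strip).filter (fun s => s ≠ "")

def pvClean (content : String) : List String :=
  pvCleanL ((PySem.Str.split? content "\n").getD [])

-- segment-splitting loop body: cut at headers, otherwise extend the current segment
def pvSegLoop (acc : List (List String) × List String) (line : String) :
    List (List String) × List String :=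
  if pvHeader line then (acc.1 ++ [acc.2], []) else (acc.1, acc.2 ++ [line])

def pvSegments (lines : List String) : List (List String) :=
  (lines.foldl pvSegLoop ([], [])).1 ++ [(lines.foldl pvSegLoop ([], [])).2]

def pvFields (seg : List String) : PySem.Dict String String := seg.foldl pvStep PySem.Dict.empty

def parse_suggestions_py_alt (content : String) : List (List (String × String)) :=
  (PySem.List.slice
    (((pvSegments (pvClean content)).map pvFields).filter (fun d => pvTruthy d))
    none (some 5)).map PySem.Dict.items

-- ===== PRECONDITION & SPEC =====
def Spec_parse_suggestions_py (content : String) (out : List (List (String × String))) : Prop := out = parse_suggestions_py_alt content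
instance (content : String) (out : List (List (String × String))) : Decidable (Spec_parse_suggestions_py content out) := by unfold Spec_parse_suggestions_py; infer_instance

-- ===== CLAIM (what is proved, stated in full; the proofs are below) =====
def Claim_equal_parse_suggestions_py : Prop := ∀ (content : String), Dom_parse_suggestions_py content → Spec_parse_suggestions_py content (parse_suggestions_py content)

-- ===== LEMMAS AND PROOFS =====

-- flush of a current dict: keep it iff its 'section' is truthy
def pvFlush (d : PySem.Dict String String) : List (List (String × String)) :=
  if pvTruthy d then [d.items] else []

-- A's clean-list loop body (strip/skip already done)
def pvGA (acc : List (List (String × String)) × PySem.Dict String String) (line : String) :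
    List (List (String × String)) × PySem.Dict String String :=
  if pvHeader line then (acc.1 ++ pvFlush acc.2, PySem.Dict.empty)
  else (acc.1, pvStep acc.2 line)

-- common recursive reference semantics on the cleaned line list
def pvR (cur : PySem.Dict String String) : List String → List (List (String × String))
  | [] => pvFlush cur
  | l :: ls => if pvHeader l then pvFlush cur ++ pvR PySem.Dict.empty ls else pvR (pvStep cur l) ls

-- A's raw loop (strip + skip-empty inline) equals the clean-list loop
theorem pvCleanL_cons (r : String) (rs : List String) :
    pvCleanL (r :: rs) = if PySem.Str.strip r = "" then pvCleanL rs
      else PySem.Str.strip r :: pvCleanL rs := by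
  unfold pvCleanL
  simp only [List.map_cons, List.filter_cons]
  split <;> simp_all

theorem pvA_clean : ∀ (raws : List String) acc,
    raws.foldl pvLoopA acc = (pvCleanL raws).foldl pvGA acc := by
  intro raws
  induction raws with
  | nil => intro acc; rfl
  | cons r rs ih =>
    intro acc
    rw [List.foldl_cons, pvCleanL_cons]
    by_cases h : PySem.Str.strip r = ""
    · have hb : pvLoopA acc r = acc := by unfold pvLoopA; simp [h]
      rw [hb, if_pos h, ih]
    · have hb : pvLoopA acc r = pvGA acc (PySem.Str.strip r) := by
        unfold pvLoopA pvGA pvFlush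
        simp only [h, if_false]
        split
        · split <;> simp_all
        · rfl
      rw [hb, if_neg h, List.foldl_cons, ih]

-- A's clean-list loop computes pvR
theorem pvA_R : ∀ (ls : List String) sugs cur,
    pvFinishA (ls.foldl pvGA (sugs, cur)) = sugs ++ pvR cur ls := by
  intro ls
  induction ls with
  | nil =>
    intro sugs cur
    simp only [List.foldl_nil, pvR, pvFinishA, pvFlush]
    split <;> simp
  | cons l ls ih =>
    intro sugs cur
    simp only [List.foldl_cons, pvR]
    by_cases h : pvHeader l
    · simp only [pvGA, h, if_true]
      rw [ih, List.append_assoc]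
    · simp only [pvGA, h, if_false, Bool.false_eq_true]
      exact ih sugs (pvStep cur l)

-- the processed-segments view of B
def pvProc (segs : List (List String)) : List (List (String × String)) :=
  ((segs.map pvFields).filter (fun d => pvTruthy d)).map PySem.Dict.items

theorem pvProc_append_singleton (segs : List (List String)) (seg : List String) :
    pvProc (segs ++ [seg]) = pvProc segs ++ pvFlush (pvFields seg) := by
  unfold pvProc pvFlush
  simp only [List.map_append, List.filter_append, List.map_cons, List.map_nil]
  split <;> simp_all [List.filter]

theorem pvFields_append_singleton (seg : List String) (l : String) :
    pvFields (seg ++ [l]) = pvStep (pvFields seg) l := by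
  unfold pvFields; rw [List.foldl_append]; rfl

-- B's segment loop computes pvR (through pvProc)
theorem pvB_R : ∀ (ls : List String) segs seg,
    pvProc ((ls.foldl pvSegLoop (segs, seg)).1 ++ [(ls.foldl pvSegLoop (segs, seg)).2])
      = pvProc segs ++ pvR (pvFields seg) ls := by
  intro ls
  induction ls with
  | nil =>
    intro segs seg
    simpa using pvProc_append_singleton segs seg
  | cons l ls ih =>
    intro segs seg
    simp only [List.foldl_cons, pvR]
    by_cases h : pvHeader l
    · simp only [pvSegLoop, h, if_true]
      rw [ih, pvProc_append_singleton]
      have he : pvFields ([] : List String) = PySem.Dict.empty := rfl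
      rw [he, List.append_assoc]
    · simp only [pvSegLoop, h, if_false, Bool.false_eq_true]
      rw [ih, pvFields_append_singleton]

-- slicing [:5] commutes with the final map to items
theorem pvSlice_map (xs : List (PySem.Dict String String)) :
    (PySem.List.slice xs none (some 5)).map PySem.Dict.items
      = PySem.List.slice (xs.map PySem.Dict.items) none (some 5) := by
  simp [pysem, List.map_take]

-- ===== VERDICT (by name: the statement is the Claim_ definition above) =====
theorem parse_suggestions_py_spec : Claim_equal_parse_suggestions_py := by
  intro content _
  unfold Spec_parse_suggestions_py parse_suggestions_py parse_suggestions_py_alt pvClean pvSegments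
  rw [pvA_clean, pvA_R, pvSlice_map]
  rw [show (((((pvCleanL ((PySem.Str.split? content "\n").getD [])).foldl pvSegLoop ([], [])).1 ++
        [((pvCleanL ((PySem.Str.split? content "\n").getD [])).foldl pvSegLoop ([], [])).2]).map
        pvFields).filter (fun d => pvTruthy d)).map PySem.Dict.items
      = pvProc (((pvCleanL ((PySem.Str.split? content "\n").getD [])).foldl pvSegLoop ([], [])).1 ++
        [((pvCleanL ((PySem.Str.split? content "\n").getD [])).foldl pvSegLoop ([], [])).2]) from rfl]
  rw [pvB_R]
  rfl
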